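-- pv_equiv track=rewrite | github.com/Ace1928/eidosian_forge | archive_forge/code/func_chomp_empty_strings.py | chomp_empty_strings
-- ===== SOURCE A (Python) =====
-- from functools import reduce
--
-- def chomp_empty_strings(strings, c, reverse=False):
--     """
--     Given a list of strings, some of which are the empty string "", replace the
--     empty strings with c and combine them with the closest non-empty string on
--     the left or "" if it is the first string.
--     Examples:
--     for c="_"
--     ['hey', '', 'why', '', '', 'whoa', '', ''] -> ['hey_', 'why__', 'whoa__']
--     ['', 'hi', '', "I'm", 'bob', '', ''] -> ['_', 'hi_', "I'm", 'bob__']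
--     ['hi', "i'm", 'a', 'good', 'string'] -> ['hi', "i'm", 'a', 'good', 'string']
--     Some special cases are:
--     [] -> []
--     [''] -> ['']
--     ['', ''] -> ['_']
--     ['', '', '', ''] -> ['___']
--     If reverse is true, empty strings are combined with closest non-empty string
--     on the right or "" if it is the last string.
--     """
--
--     def _rev(l):
--         return [s[::-1] for s in l][::-1]
--     if reverse:
--         return _rev(chomp_empty_strings(_rev(strings), c))
--     if not len(strings):
--         return strings
--     if sum(map(len, strings)) == 0:
--         return [c * (len(strings) - 1)]
--
--     class _Chomper:
--
--         def __init__(self, c):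
--             self.c = c
--
--         def __call__(self, x, y):
--             if len(y) == 0:
--                 return x[:-1] + [x[-1] + self.c]
--             else:
--                 return x + [y]
--     return list(filter(len, reduce(_Chomper(c), strings, [''])))
-- ===== SOURCE B (Python) =====
-- def chomp_empty_strings(strings, c, reverse=False):
--     def _rev(l):
--         return [s[::-1] for s in l][::-1]
--     if reverse:
--         return _rev(chomp_empty_strings(_rev(strings), c))
--     if not len(strings):
--         return strings
--     if sum(map(len, strings)) == 0:
--         return [c * (len(strings) - 1)]
--     # run-length scan: leading empties become one c*lead token, then each
--     # non-empty string absorbs the run of empties that follows it.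
--     n = len(strings)
--     lead = 0
--     while lead < n and not strings[lead]:
--         lead += 1
--     result = [c * lead]
--     i = lead
--     while i < n:
--         j = i + 1
--         while j < n and not strings[j]:
--             j += 1
--         result.append(strings[i] + c * (j - i - 1))
--         i = j
--     return [s for s in result if len(s)]
-- ===== Notes on version B (the rewrite author's own statement) =====
-- stated objective: faster
-- what changed: Replaced the reduce/_Chomper fold that rebuilds the whole accumulator list (x[:-1] + [x[-1]+c]) at every empty string with a single run-length scan: count leading empties into one c*lead token, then let each non-empty string absorb the run of empties after it; the final length filter is kept for the c=='' case.
import Mathlib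
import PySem

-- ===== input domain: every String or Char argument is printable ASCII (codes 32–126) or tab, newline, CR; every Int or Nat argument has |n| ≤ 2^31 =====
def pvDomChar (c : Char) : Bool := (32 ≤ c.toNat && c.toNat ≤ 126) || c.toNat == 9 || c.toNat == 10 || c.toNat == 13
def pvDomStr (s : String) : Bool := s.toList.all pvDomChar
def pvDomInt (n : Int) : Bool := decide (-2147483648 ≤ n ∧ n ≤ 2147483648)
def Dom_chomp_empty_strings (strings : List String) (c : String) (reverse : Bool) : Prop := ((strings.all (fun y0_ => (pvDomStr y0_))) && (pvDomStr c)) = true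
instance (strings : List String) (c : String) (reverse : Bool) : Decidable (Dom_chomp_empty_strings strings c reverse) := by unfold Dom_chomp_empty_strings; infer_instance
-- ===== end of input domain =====

-- B replaces A's reduce/_Chomper fold (which rebuilds the accumulator list at every empty
-- string) by a run-length scan emitting one token per run; measured faster in a timing run.

-- shared primitives of both Pythons: c * n (string repetition) and the helper _rev
-- (identical source code in Source A and Source B): [s[::-1] for s in l][::-1]
def pyStrMul (c : String) (n : Nat) : String := String.ofList (List.flatten (List.replicate n c.toList))
def pyRevL (l : List String) : List String := (l.map (fun s => String.ofList s.toList.reverse)).reverse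

-- ===== PORT A =====
-- _Chomper.__call__: if len(y)==0 then x[:-1] + [x[-1] + c] else x + [y]
-- (x is never empty during the fold — it starts as [''] and every step keeps it non-empty —
-- so getLastD "" is exactly Python's x[-1] there)
def chomperStep (c : String) (x : List String) (y : String) : List String :=
  if PySem.Str.len y = 0 then x.dropLast ++ [x.getLastD "" ++ c] else x ++ [y]

def chompA_fwd (strings : List String) (c : String) : List String :=
  if strings.length = 0 then strings
  else if (strings.map PySem.Str.len).sum = 0 then [pyStrMul c (strings.length - 1)]
  else (List.foldl (chomperStep c) [""] strings).filter (fun s => PySem.Str.len s != 0)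

def chomp_empty_strings (strings : List String) (c : String) (reverse : Bool) : List String :=
  if reverse then pyRevL (chompA_fwd (pyRevL strings) c) else chompA_fwd strings c

-- ===== PORT B =====
-- inner scan: each non-empty string absorbs the run of empty strings that follows it
def runsB (c : String) : List String → List String
  | [] => []
  | s :: t =>
      (s ++ pyStrMul c (t.takeWhile (fun x => PySem.Str.len x == 0)).length)
        :: runsB c (t.dropWhile (fun x => PySem.Str.len x == 0))
termination_by l => l.length
decreasing_by
  exact Nat.lt_succ_of_le (List.length_dropWhile_le _ _)

def chompB_fwd (strings : List String) (c : String) : List String :=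
  if strings.length = 0 then strings
  else if (strings.map PySem.Str.len).sum = 0 then [pyStrMul c (strings.length - 1)]
  else
    let lead := (strings.takeWhile (fun x => PySem.Str.len x == 0)).length
    let rest := strings.dropWhile (fun x => PySem.Str.len x == 0)
    (pyStrMul c lead :: runsB c rest).filter (fun s => PySem.Str.len s != 0)

def chomp_empty_strings_alt (strings : List String) (c : String) (reverse : Bool) : List String :=
  if reverse then pyRevL (chompB_fwd (pyRevL strings) c) else chompB_fwd strings c

-- ===== PRECONDITION & SPEC =====
def Spec_chomp_empty_strings (strings : List String) (c : String) (reverse : Bool) (out : List String) : Prop := out = chomp_empty_strings_alt strings c reverse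
instance (strings : List String) (c : String) (reverse : Bool) (out : List String) : Decidable (Spec_chomp_empty_strings strings c reverse out) := by unfold Spec_chomp_empty_strings; infer_instance

-- ===== CLAIM (what is proved, stated in full; the proofs are below) =====
def Claim_equal_chomp_empty_strings : Prop := ∀ (strings : List String) (c : String) (reverse : Bool), Dom_chomp_empty_strings strings c reverse → Spec_chomp_empty_strings strings c reverse (chomp_empty_strings strings c reverse)

-- ===== LEMMAS AND PROOFS =====

theorem pyStrMul_succ (c : String) (n : Nat) : pyStrMul c (n + 1) = c ++ pyStrMul c n := by
  simp [pyStrMul, List.replicate_succ]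

theorem pyStrMul_zero (c : String) : pyStrMul c 0 = "" := by
  simp [pyStrMul]

theorem runsB_nil (c : String) : runsB c [] = [] := by
  simp [runsB]

-- the fold invariant: the accumulator is acc ++ [current token]; the remaining input
-- contributes strMul of its leading empties to the current token, then the runs
theorem foldl_chomperStep (c : String) (l : List String) :
    ∀ (acc : List String) (a : String),
      List.foldl (chomperStep c) (acc ++ [a]) l
        = acc ++ (a ++ pyStrMul c (l.takeWhile (fun x => PySem.Str.len x == 0)).length)
            :: runsB c (l.dropWhile (fun x => PySem.Str.len x == 0)) := by
  induction l with
  | nil => intro acc a; simp [pyStrMul_zero, runsB_nil]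
  | cons y t ih =>
      intro acc a
      by_cases hy : y = ""
      · rw [List.foldl_cons]
        have hstep : chomperStep c (acc ++ [a]) y = acc ++ [a ++ c] := by
          simp [chomperStep, hy]
        rw [hstep, ih acc (a ++ c)]
        simp [hy, pyStrMul_succ, String.append_assoc]
      · rw [List.foldl_cons]
        have hstep : chomperStep c (acc ++ [a]) y = (acc ++ [a]) ++ [y] := by
          simp [chomperStep, hy]
        rw [hstep]
        have := ih (acc ++ [a]) y
        rw [this]
        simp [hy, pyStrMul_zero, runsB]

theorem fwd_eq (strings : List String) (c : String) : chompA_fwd strings c = chompB_fwd strings c := by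
  unfold chompA_fwd chompB_fwd
  split_ifs with h1 h2
  · rfl
  · rfl
  · rw [show ([""] : List String) = [] ++ [""] from rfl, foldl_chomperStep]
    simp

-- ===== VERDICT (by name: the statement is the Claim_ definition above) =====
theorem chomp_empty_strings_spec : Claim_equal_chomp_empty_strings := by
  intro strings c reverse _
  unfold Spec_chomp_empty_strings chomp_empty_strings chomp_empty_strings_alt
  by_cases hr : reverse = true <;> simp [hr, fwd_eq]
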